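-- pv_equiv track=rewrite | github.com/theshivam7/indian-asr-bench | task4_youtube_captions/align_youtube_captions.py | align_hypothesis
-- ===== SOURCE A (Python) =====
-- from collections import Counter
--
-- WINDOW_MULTIPLIER = 1.5  # aligned window = ref_len * this factor
--
-- def align_hypothesis(ref_text: str, hyp_text: str) -> str:
--     """Extract the span of hyp_text that best matches ref_text by word overlap.
--
--     Uses O(M) incremental Jaccard — alignment criterion is word set overlap,
--     NOT WER, so evaluation and alignment are independent.
--
--     Returns the best-matching substring of hyp_text (as a string).
--     If hypothesis is shorter than the window, returns hypothesis unchanged.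
--     """
--     ref_words = ref_text.lower().split()
--     hyp_words = hyp_text.lower().split()
--     n_ref = len(ref_words)
--     n_hyp = len(hyp_words)
--     window_size = max(n_ref, int(n_ref * WINDOW_MULTIPLIER))
--
--     if n_hyp <= window_size:
--         return hyp_text  # already short enough — return as-is
--
--     ref_counter = Counter(ref_words)
--
--     # Initialize first window
--     win_counter = Counter(hyp_words[:window_size])
--     intersection = sum(min(ref_counter[w], win_counter[w]) for w in ref_counter)
--
--     best_intersection = intersection
--     best_start = 0
--
--     for start in range(1, n_hyp - window_size + 1):
--         out_word = hyp_words[start - 1]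
--         in_word  = hyp_words[start + window_size - 1]
--
--         # Remove out_word from window
--         if out_word in ref_counter:
--             r = ref_counter[out_word]
--             w_before = win_counter[out_word]
--             intersection += min(r, w_before - 1) - min(r, w_before)
--         win_counter[out_word] -= 1
--         if win_counter[out_word] == 0:
--             del win_counter[out_word]
--
--         # Add in_word to window
--         if in_word in ref_counter:
--             r = ref_counter[in_word]
--             w_before = win_counter.get(in_word, 0)
--             intersection += min(r, w_before + 1) - min(r, w_before)
--         win_counter[in_word] += 1
--
--         if intersection > best_intersection:
--             best_intersection = intersection
--             best_start = start
--
--     # Return original-casing words from hyp_text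
--     orig_words = hyp_text.split()
--     return " ".join(orig_words[best_start : best_start + window_size])
-- ===== SOURCE B (Python) =====
-- from collections import Counter
--
-- WINDOW_MULTIPLIER = 1.5  # aligned window = ref_len * this factor
--
-- def align_hypothesis(ref_text: str, hyp_text: str) -> str:
--     """Brute-force variant: score every window from scratch by word overlap.
--
--     For each candidate start, counts overlap directly on the window list
--     (sum of min(ref count, window count) over ref words); first maximal
--     window wins. No incremental counter maintenance.
--     """
--     ref_words = ref_text.lower().split()
--     hyp_words = hyp_text.lower().split()
--     n_ref = len(ref_words)
--     n_hyp = len(hyp_words)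
--     window_size = max(n_ref, int(n_ref * WINDOW_MULTIPLIER))
--
--     if n_hyp <= window_size:
--         return hyp_text
--
--     ref_counter = Counter(ref_words)
--     best_start = 0
--     best_overlap = -1
--     for start in range(0, n_hyp - window_size + 1):
--         window = hyp_words[start:start + window_size]
--         overlap = sum(min(c, window.count(w)) for w, c in ref_counter.items())
--         if overlap > best_overlap:
--             best_overlap = overlap
--             best_start = start
--
--     orig_words = hyp_text.split()
--     return " ".join(orig_words[best_start:best_start + window_size])
-- ===== Notes on version B (the rewrite author's own statement) =====
-- stated objective: simpler
-- what changed: Replaces the incremental sliding-window Counter with in-place intersection bookkeeping by a direct scan that rebuilds each window slice and scores it from scratch with list.count, keeping the first strictly-best start.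
import Mathlib
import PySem

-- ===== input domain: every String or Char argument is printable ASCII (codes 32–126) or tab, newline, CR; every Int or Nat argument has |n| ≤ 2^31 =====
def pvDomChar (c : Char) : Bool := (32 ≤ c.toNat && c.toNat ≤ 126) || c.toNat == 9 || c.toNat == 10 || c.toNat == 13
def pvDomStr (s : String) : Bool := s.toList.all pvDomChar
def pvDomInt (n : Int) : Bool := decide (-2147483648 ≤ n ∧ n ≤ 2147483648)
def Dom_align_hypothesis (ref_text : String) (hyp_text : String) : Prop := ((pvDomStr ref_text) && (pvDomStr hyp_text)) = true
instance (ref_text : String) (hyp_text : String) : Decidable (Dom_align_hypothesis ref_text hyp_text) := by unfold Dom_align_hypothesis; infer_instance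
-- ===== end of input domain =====

-- B replaces A's incremental sliding-window Counter bookkeeping by a direct rescan of every window
-- (fresh slice + list.count per start, first strictly-best start wins); objective: simpler, not faster.
-- In both ports int(n_ref * 1.5) is rendered as n_ref + n_ref // 2, exact for every word count < 2^51
-- (1.5 and the product are then exact IEEE doubles, and int() truncates the nonnegative value down).

-- ===== PORT A =====
-- A's loop body as a named helper (the literal body of A's `for start in range(...)` loop);
-- state = (win_counter, intersection, best_intersection, best_start)
def pyAStep (ref_counter : PySem.Dict String Int) (hyp_words : List String) (window_size : Int)
    (st : PySem.Dict String Int × Int × Int × Int) (start : Int) :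
    PySem.Dict String Int × Int × Int × Int :=
  let win_counter := st.1
  let intersection := st.2.1
  let best_intersection := st.2.2.1
  let best_start := st.2.2.2
  let out_word := PySem.List.pyGetD hyp_words (start - 1) ""
  let in_word := PySem.List.pyGetD hyp_words (start + window_size - 1) ""
  -- Remove out_word from window
  let intersection :=
    if ref_counter.contains out_word then
      let r := ref_counter.getD out_word 0
      let w_before := win_counter.getD out_word 0
      intersection + (min r (w_before - 1) - min r w_before)
    else intersection
  let win_counter := win_counter.modify out_word 0 (· - 1)
  let win_counter := if win_counter.getD out_word 0 == 0 then win_counter.erase out_word else win_counter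
  -- Add in_word to window
  let intersection :=
    if ref_counter.contains in_word then
      let r := ref_counter.getD in_word 0
      let w_before := win_counter.getD in_word 0
      intersection + (min r (w_before + 1) - min r w_before)
    else intersection
  let win_counter := win_counter.modify in_word 0 (· + 1)
  if intersection > best_intersection then (win_counter, intersection, intersection, start)
  else (win_counter, intersection, best_intersection, best_start)

def align_hypothesis (ref_text : String) (hyp_text : String) : String :=
  let ref_words := PySem.Str.split₀ (PySem.Str.lower ref_text)
  let hyp_words := PySem.Str.split₀ (PySem.Str.lower hyp_text)
  let n_ref : Int := ref_words.length
  let n_hyp : Int := hyp_words.length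
  let window_size : Int := max n_ref (n_ref + PySem.Int.floordiv n_ref 2)
  if n_hyp ≤ window_size then hyp_text
  else
    let ref_counter := PySem.Dict.counter ref_words
    let win_counter := PySem.Dict.counter (PySem.List.slice hyp_words none (some window_size))
    let intersection := (ref_counter.keys).foldl
      (fun s w => s + min (ref_counter.getD w 0) (win_counter.getD w 0)) 0
    let st := (PySem.List.pyRange 1 (n_hyp - window_size + 1) 1).foldl
      (pyAStep ref_counter hyp_words window_size) (win_counter, intersection, intersection, 0)
    let best_start := st.2.2.2
    let orig_words := PySem.Str.split₀ hyp_text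
    PySem.Str.join " " (PySem.List.slice orig_words (some best_start) (some (best_start + window_size)))

-- ===== PORT B =====
-- B's loop body: score the window slice from scratch; state = (best_start, best_overlap)
def pyBStep (ref_counter : PySem.Dict String Int) (hyp_words : List String) (window_size : Int)
    (st : Int × Int) (start : Int) : Int × Int :=
  let window := PySem.List.slice hyp_words (some start) (some (start + window_size))
  let overlap := ref_counter.items.foldl (fun s p => s + min p.2 ((window.count p.1 : Int))) 0
  if overlap > st.2 then (start, overlap) else st

def align_hypothesis_alt (ref_text : String) (hyp_text : String) : String :=
  let ref_words := PySem.Str.split₀ (PySem.Str.lower ref_text)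
  let hyp_words := PySem.Str.split₀ (PySem.Str.lower hyp_text)
  let n_ref : Int := ref_words.length
  let n_hyp : Int := hyp_words.length
  let window_size : Int := max n_ref (n_ref + PySem.Int.floordiv n_ref 2)
  if n_hyp ≤ window_size then hyp_text
  else
    let ref_counter := PySem.Dict.counter ref_words
    let st := (PySem.List.pyRange 0 (n_hyp - window_size + 1) 1).foldl
      (pyBStep ref_counter hyp_words window_size) (0, -1)
    let orig_words := PySem.Str.split₀ hyp_text
    PySem.Str.join " " (PySem.List.slice orig_words (some st.1) (some (st.1 + window_size)))

-- ===== PRECONDITION & SPEC =====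
def Spec_align_hypothesis (ref_text : String) (hyp_text : String) (out : String) : Prop := out = align_hypothesis_alt ref_text hyp_text
instance (ref_text : String) (hyp_text : String) (out : String) : Decidable (Spec_align_hypothesis ref_text hyp_text out) := by unfold Spec_align_hypothesis; infer_instance

-- ===== CLAIM (what is proved, stated in full; the proofs are below) =====
def Claim_equal_align_hypothesis : Prop := ∀ (ref_text : String) (hyp_text : String), Dom_align_hypothesis ref_text hyp_text → Spec_align_hypothesis ref_text hyp_text (align_hypothesis ref_text hyp_text)

-- ===== LEMMAS AND PROOFS =====

-- overlap of ref-word multiset with the window of width W starting at j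
def pvOv (R H : List String) (W : Nat) (j : Nat) : Int :=
  ((PySem.Set.ofList R).map
    (fun k => min ((R.count k : Int)) ((((H.drop j).take W).count k : Int)))).sum

-- A-shaped argmax step (best_value, best_index) and B-shaped (best_index, best_value)
def pvGA (f : Int → Int) (st : Int × Int) (j : Int) : Int × Int :=
  if f j > st.1 then (f j, j) else st
def pvGB (f : Int → Int) (st : Int × Int) (j : Int) : Int × Int :=
  if f j > st.2 then (j, f j) else st

lemma pv_swap_fold (f : Int → Int) (l : List Int) :
    ∀ bi bs : Int, l.foldl (pvGB f) (bs, bi) = Prod.swap (l.foldl (pvGA f) (bi, bs)) := by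
  induction l with
  | nil => intro bi bs; rfl
  | cons x xs ih =>
    intro bi bs
    simp only [List.foldl_cons, pvGA, pvGB]
    by_cases h : f x > bi <;> simp [h, ih]

lemma pv_find?_filter_ne {κ ν : Type} [BEq κ] [LawfulBEq κ] (l : List (κ × ν)) (k k' : κ) :
    (l.filter (fun p => !p.1 == k)).find? (fun p => p.1 == k')
      = if k' == k then none else l.find? (fun p => p.1 == k') := by
  induction l with
  | nil => by_cases he : k' = k <;> simp [he]
  | cons x xs ih =>
    by_cases he : k' = k
    · subst he
      by_cases hk : x.1 = k' <;> simp [List.filter_cons, List.find?_cons, hk, ih]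
    · by_cases hk : x.1 = k
      · simp [List.filter_cons, List.find?_cons, hk, ih, he, Ne.symm he]
      · by_cases hx : x.1 = k' <;> simp [List.filter_cons, List.find?_cons, hk, hx, he, ih]

lemma pv_getD_erase {κ ν : Type} [BEq κ] [LawfulBEq κ] (d : PySem.Dict κ ν) (k k' : κ) (d0 : ν) :
    (d.erase k).getD k' d0 = if k' == k then d0 else d.getD k' d0 := by
  unfold PySem.Dict.erase PySem.Dict.getD PySem.Dict.get?
  rw [pv_find?_filter_ne]
  by_cases he : k' = k <;> simp [he]

-- sum over a nodup list of a function supported on at most two keys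
lemma pv_sum_delta (L : List String) (hnd : L.Nodup) (δ : String → Int) (a b : String)
    (h : ∀ k ∈ L, k ≠ a → k ≠ b → δ k = 0) :
    (L.map δ).sum = (if a ∈ L then δ a else 0) + (if b ∈ L ∧ b ≠ a then δ b else 0) := by
  induction L with
  | nil => simp
  | cons x xs ih =>
    have hx : x ∉ xs := (List.nodup_cons.mp hnd).1
    have ih' := ih (List.nodup_cons.mp hnd).2 (fun k hk => h k (List.mem_cons_of_mem _ hk))
    simp only [List.map_cons, List.sum_cons, List.mem_cons, ih']
    by_cases hxa : x = a
    · subst hxa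
      by_cases hba : b = x
      · subst hba; simp [hx]
      · simp only [true_or, if_pos]
        have : (b = x ∨ b ∈ xs) ∧ b ≠ x ↔ b ∈ xs ∧ b ≠ x := by
          constructor
          · rintro ⟨hb | hb, hne⟩
            · exact absurd hb hne
            · exact ⟨hb, hne⟩
          · exact fun ⟨hb, hne⟩ => ⟨Or.inr hb, hne⟩
        rw [if_congr this rfl rfl]
        simp [hx]
    · by_cases hxb : x = b
      · subst hxb
        have hba : x ≠ a := hxa
        simp only [eq_comm (a := x)] at hxa
        have h1 : (a = x ∨ a ∈ xs) ↔ a ∈ xs := by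
          constructor
          · rintro (h' | h')
            · exact absurd h'.symm hba
            · exact h'
          · exact Or.inr
        rw [if_congr h1 rfl rfl]
        have h2 : (x = x ∨ x ∈ xs) ∧ x ≠ a ↔ True := by simp [hba]
        rw [if_congr h2 rfl rfl, if_pos trivial]
        have h3 : ¬ (x ∈ xs ∧ x ≠ a) := fun hc => hx hc.1
        rw [if_neg h3]
        ring
      · have hδ : δ x = 0 := h x (List.mem_cons_self) hxa hxb
        have h1 : (a = x ∨ a ∈ xs) ↔ a ∈ xs := by
          constructor
          · rintro (h' | h')
            · exact absurd h'.symm hxa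
            · exact h'
          · exact Or.inr
        have h2 : (b = x ∨ b ∈ xs) ∧ b ≠ a ↔ b ∈ xs ∧ b ≠ a := by
          constructor
          · rintro ⟨hb | hb, hne⟩
            · exact absurd hb.symm hxb
            · exact ⟨hb, hne⟩
          · exact fun ⟨hb, hne⟩ => ⟨Or.inr hb, hne⟩
        rw [if_congr h1 rfl rfl, if_congr h2 rfl rfl, hδ]
        ring

lemma pv_sum_map_sub (L : List String) (f g : String → Int) :
    (L.map (fun k => g k - f k)).sum = (L.map g).sum - (L.map f).sum := by
  induction L with
  | nil => simp
  | cons x xs ih => simp only [List.map_cons, List.sum_cons, ih]; ring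

lemma pv_sum_support (L : List String) (hnd : L.Nodup) (f g : String → Int) (a b : String)
    (h : ∀ k ∈ L, k ≠ a → k ≠ b → g k = f k) :
    (L.map g).sum = (L.map f).sum
      + (if a ∈ L then g a - f a else 0)
      + (if b ∈ L ∧ b ≠ a then g b - f b else 0) := by
  have hδ := pv_sum_delta L hnd (fun k => g k - f k) a b
    (fun k hk h1 h2 => by simp [h k hk h1 h2])
  simp only [pv_sum_map_sub] at hδ
  omega

-- sliding-window count shift
lemma pv_window_shift (H : List String) (W j : Nat) (hj : j + W < H.length) (k : String) :
    (((H.drop (j+1)).take W).count k : Int)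
      = ((H.drop j).take W).count k
        - (if k = H.getD j "" then 1 else 0) + (if k = H.getD (j+W) "" then 1 else 0) := by
  cases W with
  | zero => simp
  | succ s =>
    have hjlen : j < H.length := by omega
    have hd : H.drop j = H.getD j "" :: H.drop (j+1) := by
      rw [List.getD_eq_getElem _ _ hjlen]
      exact List.drop_eq_getElem_cons hjlen
    have ht : (H.drop (j+1)).take (s+1) = (H.drop (j+1)).take s ++ [H.getD (j+(s+1)) ""] := by
      rw [List.take_succ]
      congr 1
      rw [List.getElem?_drop, List.getElem?_eq_getElem (by omega),
        List.getD_eq_getElem _ _ (by omega)]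
      simp only [Option.toList_some, List.cons.injEq, and_true]
      congr 1
      omega
    rw [ht, hd]
    simp only [List.take_succ_cons, List.count_append, List.count_cons, List.count_singleton,
      List.count_nil]
    simp only [beq_iff_eq, eq_comm (a := k)]
    by_cases h1 : H.getD j "" = k <;> by_cases h2 : H.getD (j + (s + 1)) "" = k <;>
      simp [h1, h2] <;> push_cast <;> omega

lemma pv_ov_nonneg (R H : List String) (W j : Nat) : 0 ≤ pvOv R H W j := by
  apply List.sum_nonneg
  intro x hx
  simp only [pvOv, List.mem_map] at hx
  obtain ⟨k, _, rfl⟩ := hx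
  exact le_min (by positivity) (by positivity)

-- one step of A's loop preserves the invariant
lemma pv_stepA (R H : List String) (W : Nat) (m : Nat) (hm : m + W < H.length)
    (d : PySem.Dict String Int) (hd : ∀ k, d.getD k 0 = (((H.drop m).take W).count k : Int))
    (bi bs : Int) :
    ∃ d' : PySem.Dict String Int,
      pyAStep (PySem.Dict.counter R) H (W : Int) (d, pvOv R H W m, bi, bs) ((m : Int) + 1)
        = (d', pvOv R H W (m+1),
           pvGA (fun j => pvOv R H W j.toNat) (bi, bs) ((m : Int) + 1))
      ∧ ∀ k, d'.getD k 0 = (((H.drop (m+1)).take W).count k : Int) := by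
  have hidx1 : ((m : Int) + 1 - 1) = ((m : Nat) : Int) := by ring
  have hidx2 : ((m : Int) + 1 + (W : Int) - 1) = (((m + W : Nat)) : Int) := by push_cast; ring
  have hmlen : m < H.length := by omega
  set out := H.getD m "" with hout
  set inw := H.getD (m + W) "" with hinw
  set c : String → Int := fun k => (((H.drop m).take W).count k : Int) with hc
  set c' : String → Int := fun k => (((H.drop (m+1)).take W).count k : Int) with hc'
  have hshift : ∀ k, c' k = c k - (if k = out then 1 else 0) + (if k = inw then 1 else 0) :=
    fun k => pv_window_shift H W m hm k
  -- the dictionary after A's remove/erase/add sequence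
  set d1 := d.modify out 0 (· - 1) with hd1
  set d2 := if d1.getD out 0 == 0 then d1.erase out else d1 with hd2def
  set d3 := d2.modify inw 0 (· + 1) with hd3
  have hd1g : ∀ k, d1.getD k 0 = if k = out then c out - 1 else c k := by
    intro k
    rw [hd1, PySem.Dict.getD_modify]
    by_cases hk : k = out <;> simp [hk, hd, hc]
  have hd2g : ∀ k, d2.getD k 0 = if k = out then c out - 1 else c k := by
    intro k
    rw [hd2def]
    by_cases hz : d1.getD out 0 == 0
    · rw [if_pos hz, pv_getD_erase]
      have hz' : c out - 1 = 0 := by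
        have := hd1g out; simp at hz; simp [this] at hz; omega
      by_cases hk : k = out <;> simp [hk, hz', hd1g]
    · rw [if_neg hz]; exact hd1g k
  have hd3g : ∀ k, d3.getD k 0 = c' k := by
    intro k
    rw [hd3, PySem.Dict.getD_modify, hshift k]
    by_cases hk : k = inw <;> by_cases hk2 : k = out
    · have hio : inw = out := hk.symm.trans hk2
      simp [hk, hio, hd2g]
    · have hio : ¬ inw = out := fun h => hk2 (hk.trans h)
      simp [hk, hio, hd2g]
    · have hio : ¬ out = inw := fun h => hk (hk2.trans h)
      simp [hk2, hk, hio, hd2g]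
    · simp [hk, hk2, hd2g]
  refine ⟨d3, ?_, hd3g⟩
  have hnd : (PySem.Set.ofList R).Nodup := PySem.Set.nodup_ofList R
  have hsup := pv_sum_support (PySem.Set.ofList R) hnd
    (fun k => min ((R.count k : Int)) (c k)) (fun k => min ((R.count k : Int)) (c' k))
    out inw (by
      intro k hk h1 h2
      simp only [hshift k, if_neg h1, if_neg h2]
      ring_nf)
  have e1 : pvOv R H W (m+1)
      = ((PySem.Set.ofList R).map (fun k => min ((R.count k : Int)) (c' k))).sum := rfl
  have e2 : pvOv R H W m
      = ((PySem.Set.ofList R).map (fun k => min ((R.count k : Int)) (c k))).sum := rfl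
  rw [← e1, ← e2] at hsup
  beta_reduce at hsup
  have hmemo : (out ∈ PySem.Set.ofList R) ↔ R.contains out = true := by
    simp [PySem.Set.mem_ofList]
  have hmemi : (inw ∈ PySem.Set.ofList R) ↔ R.contains inw = true := by
    simp [PySem.Set.mem_ofList]
  simp only [hmemo, hmemi] at hsup
  have hX : (if R.contains inw = true then
        (if R.contains out = true then
            pvOv R H W m
              + (min ((R.count out : Int)) (c out - 1) - min ((R.count out : Int)) (c out))
          else pvOv R H W m)
          + (min ((R.count inw : Int)) ((if inw = out then c out - 1 else c inw) + 1)
              - min ((R.count inw : Int)) (if inw = out then c out - 1 else c inw))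
      else (if R.contains out = true then
            pvOv R H W m
              + (min ((R.count out : Int)) (c out - 1) - min ((R.count out : Int)) (c out))
          else pvOv R H W m)) = pvOv R H W (m+1) := by
    by_cases hio : inw = out
    · have hvo : c' out = c out := by
        rw [hshift out]; simp [hio]
      rw [hio] at hsup ⊢
      simp only [if_pos rfl] at hsup ⊢
      simp only [ne_eq, not_true_eq_false, and_false, if_false, add_zero] at hsup
      rw [hvo] at hsup
      by_cases hmo' : R.contains out = true <;>
        simp only [hmo', Bool.false_eq_true, if_true, if_false] <;> omega
    · have hvo : c' out = c out - 1 := by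
        rw [hshift out, if_pos rfl, if_neg (fun h : out = inw => hio h.symm)]; ring
      have hvi : c' inw = c inw + 1 := by
        rw [hshift inw]; simp [hio]
      have hand : (R.contains inw = true ∧ inw ≠ out) ↔ (R.contains inw = true) := by
        simp [hio]
      simp only [hand, hvo, hvi, if_neg hio] at hsup ⊢
      by_cases hmo' : R.contains out = true <;> by_cases hmi' : R.contains inw = true <;>
        simp only [hmo', hmi', Bool.false_eq_true, if_true, if_false] at hsup ⊢ <;> omega
  have htn : ((m : Int) + 1).toNat = m + 1 := by omega
  simp only [pyAStep, hidx1, hidx2, PySem.List.pyGetD_natCast, ← hout, ← hinw,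
    PySem.Dict.contains_counter, PySem.Dict.getD_counter, ← hd1, ← hd2def, ← hd3, hd, hd2g]
  rw [hX]
  simp only [pvGA, htn]
  by_cases hgt : pvOv R H W (m+1) > bi <;> simp [hgt]

-- the A loop, folded m steps, reaches overlap pvOv m and the argmax fold state
lemma pv_A_loop (R H : List String) (W : Nat) (S : Nat) (hS : W + S ≤ H.length)
    (init_d : PySem.Dict String Int)
    (h_init : ∀ k, init_d.getD k 0 = ((H.take W).count k : Int)) :
    ∀ m : Nat, m ≤ S →
      ∃ d : PySem.Dict String Int,
        (PySem.List.pyRange 1 ((m : Int) + 1) 1).foldl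
            (pyAStep (PySem.Dict.counter R) H (W : Int))
            (init_d, pvOv R H W 0, pvOv R H W 0, 0)
          = (d, pvOv R H W m,
              (PySem.List.pyRange 1 ((m : Int) + 1) 1).foldl
                (pvGA (fun j => pvOv R H W j.toNat)) (pvOv R H W 0, 0))
        ∧ ∀ k, d.getD k 0 = (((H.drop m).take W).count k : Int) := by
  intro m
  induction m with
  | zero =>
    intro _
    refine ⟨init_d, ?_, ?_⟩
    · rw [PySem.List.pyRange_one_eq_nil (by norm_num)]
      rfl
    · intro k; simpa using h_init k
  | succ n ih =>
    intro hle
    obtain ⟨d, hfold, hd⟩ := ih (by omega)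
    have hm : n + W < H.length := by omega
    obtain ⟨d', hstep, hd'⟩ := pv_stepA R H W n hm d hd
      ((PySem.List.pyRange 1 ((n : Int) + 1) 1).foldl
        (pvGA (fun j => pvOv R H W j.toNat)) (pvOv R H W 0, 0)).1
      ((PySem.List.pyRange 1 ((n : Int) + 1) 1).foldl
        (pvGA (fun j => pvOv R H W j.toNat)) (pvOv R H W 0, 0)).2
    have hsplit : PySem.List.pyRange 1 (((n+1 : Nat) : Int) + 1) 1
        = PySem.List.pyRange 1 ((n : Int) + 1) 1 ++ [((n : Int) + 1)] := by
      have hb : (((n+1 : Nat) : Int) + 1) = ((n : Int) + 1) + 1 := by push_cast; ring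
      rw [hb, PySem.List.pyRange_one_succ_right (by omega)]
    refine ⟨d', ?_, hd'⟩
    rw [hsplit, List.foldl_append, List.foldl_append, hfold]
    simp only [List.foldl_cons, List.foldl_nil]
    simp only [Prod.mk.eta] at hstep
    exact hstep

-- B's step is the argmax step pvGB on in-range starts
lemma pv_stepB (R H : List String) (W : Nat) (st : Int × Int) (start : Int) (h0 : 0 ≤ start) :
    pyBStep (PySem.Dict.counter R) H (W : Int) st start
      = pvGB (fun j => pvOv R H W j.toNat) st start := by
  have hw : PySem.List.slice H (some start) (some (start + (W : Int)))
      = (H.drop start.toNat).take W := by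
    rw [PySem.List.slice_toNat H h0 (by omega)]
    congr 1
    omega
  simp only [pyBStep, pvGB, hw, PySem.Dict.items_counter, List.foldl_map, PySem.List.foldl_add,
    zero_add]
  rfl

-- ===== VERDICT (by name: the statement is the Claim_ definition above) =====
set_option maxHeartbeats 2000000 in
theorem align_hypothesis_spec : Claim_equal_align_hypothesis := by
  intro ref_text hyp_text _
  unfold Spec_align_hypothesis
  simp only [align_hypothesis, align_hypothesis_alt]
  set R := PySem.Str.split₀ (PySem.Str.lower ref_text) with hRdef
  set Hw := PySem.Str.split₀ (PySem.Str.lower hyp_text) with hHdef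
  set ws : Int := max (R.length : Int) ((R.length : Int) + PySem.Int.floordiv (R.length : Int) 2) with hwsdef
  by_cases hle : (Hw.length : Int) ≤ ws
  · simp [hle]
  · simp only [if_neg hle]
    have hws0 : 0 ≤ ws := le_trans (Int.natCast_nonneg _) (le_max_left _ _)
    set W : Nat := ws.toNat with hWdef
    have hWs : (W : Int) = ws := Int.toNat_of_nonneg hws0
    rw [← hWs]
    set S : Nat := ((Hw.length : Int) - ws).toNat with hSdef
    have hSs : (S : Int) = (Hw.length : Int) - ws := by omega
    have hlen : W + S ≤ Hw.length := by omega
    rw [show ((Hw.length : Int) - (W : Int) + 1) = ((S : Int) + 1) from by omega]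
    rw [PySem.List.slice_to Hw (by omega)]
    simp only [Int.toNat_natCast]
    have hI0 : ((PySem.Dict.counter R).keys.foldl
        (fun s w => s + min ((PySem.Dict.counter R).getD w 0)
          ((PySem.Dict.counter (Hw.take W)).getD w 0)) 0) = pvOv R Hw W 0 := by
      rw [PySem.Dict.keys_counter, PySem.List.foldl_add, zero_add]
      unfold pvOv
      rw [List.drop_zero]
      exact congrArg List.sum (List.map_congr_left (fun w _ => by
        rw [PySem.Dict.getD_counter, PySem.Dict.getD_counter]))
    rw [hI0]
    obtain ⟨dfin, hfold, -⟩ := pv_A_loop R Hw W S hlen (PySem.Dict.counter (Hw.take W))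
      (fun k => PySem.Dict.getD_counter (Hw.take W) k) S le_rfl
    rw [hfold]
    have hB : (PySem.List.pyRange 0 ((S : Int) + 1) 1).foldl
        (pyBStep (PySem.Dict.counter R) Hw (W : Int)) (0, -1)
        = (PySem.List.pyRange 0 ((S : Int) + 1) 1).foldl
            (pvGB (fun j => pvOv R Hw W j.toNat)) (0, -1) := by
      apply PySem.List.foldl_congr_mem
      intro acc x hx
      exact pv_stepB R Hw W acc x (PySem.List.mem_pyRange_one.mp hx).1
    rw [hB, PySem.List.pyRange_one_cons (a := 0) (b := (S : Int) + 1) (by omega), List.foldl_cons]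
    have h0 : pvGB (fun j => pvOv R Hw W j.toNat) (0, -1) 0 = (0, pvOv R Hw W 0) := by
      unfold pvGB
      rw [if_pos]
      · norm_num
      · have := pv_ov_nonneg R Hw W 0
        simp only [Int.toNat_zero]
        omega
    rw [h0, pv_swap_fold]
    rfl
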